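-- pv_equiv track=rewrite | github.com/alexcs123/FooBar | level 3/find-the-access-codes.py | solution
-- ===== SOURCE A (Python) =====
-- def solution(l):
--     doubles = [0] * len(l)
--     triples = 0
--
--     for i in range(len(l) - 2):
--         for j in range(i + 1):
--             doubles[i + 1] += 1 if l[i + 1] % l[j] == 0 else 0
--             triples += doubles[j + 1] if l[i + 2] % l[j + 1] == 0 else 0
--
--     return triples
-- ===== SOURCE B (Python) =====
-- def solution(l):
--     n = len(l)
--     total = 0
--     for j in range(1, n - 1):
--         left = sum(1 for i in range(j) if l[j] % l[i] == 0)
--         right = sum(1 for k in range(j + 1, n) if l[k] % l[j] == 0)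
--         total += left * right
--     return total
-- ===== Notes on version B (the rewrite author's own statement) =====
-- stated objective: alternative
-- what changed: Replaces A's fused accumulation over a shared mutable doubles[] table (triples summed from partially-built table entries under shifted indices) with the middle-element formulation: no table at all, for each middle index j the answer gains (count of earlier divisors of l[j]) * (count of later multiples of l[j]); Pre_ only excludes inputs where both programs raise ZeroDivisionError (a zero used as a divisor).
import Mathlib
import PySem

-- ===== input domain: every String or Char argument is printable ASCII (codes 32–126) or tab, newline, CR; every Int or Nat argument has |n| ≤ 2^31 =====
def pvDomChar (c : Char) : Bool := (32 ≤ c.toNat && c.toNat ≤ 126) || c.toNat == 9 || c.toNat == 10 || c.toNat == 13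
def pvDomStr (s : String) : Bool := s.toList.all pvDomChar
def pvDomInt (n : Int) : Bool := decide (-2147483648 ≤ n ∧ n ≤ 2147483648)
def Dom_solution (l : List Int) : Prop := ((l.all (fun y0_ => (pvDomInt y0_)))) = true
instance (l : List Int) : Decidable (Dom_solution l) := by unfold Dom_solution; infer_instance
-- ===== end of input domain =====

-- B replaces A's fused pass over a shared mutable doubles[] table with the middle-element
-- formulation: per middle index j, add (earlier divisors of l[j]) * (later multiples of l[j]).

-- ===== PORT A =====
-- Literal port of A. range(len(l)-2) / range(i+1) become List.range with truncating Nat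
-- subtraction (no iterations when the list is short, exactly as Python); l[k] is ported as l.getD k 0,
-- exact because every index A reads is in range; Python '%' is PySem.Int.mod, exact on
-- Pre_ (which excludes exactly the zero divisors, where Python raises ZeroDivisionError).
def solution (l : List Int) : Int :=
  ((List.range (l.length - 2)).foldl (fun (st : List Int × Int) i =>
      (List.range (i + 1)).foldl (fun (st : List Int × Int) j =>
        let d := st.1.set (i + 1)
          (st.1.getD (i + 1) 0 + (if PySem.Int.mod (l.getD (i + 1) 0) (l.getD j 0) = 0 then 1 else 0))
        (d, st.2 + (if PySem.Int.mod (l.getD (i + 2) 0) (l.getD (j + 1) 0) = 0 then d.getD (j + 1) 0 else 0)))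
        st)
    (List.replicate l.length 0, 0)).2

-- ===== PORT B =====
-- Literal port of Source B: range(1, n-1) = List.range' 1 (n-2), range(j+1, n) = List.range' (j+1) (n-(j+1));
-- sum(1 for … if c) is the sum of the if-indicators; same indexing/mod conventions as above.
def solution_alt (l : List Int) : Int :=
  let n := l.length
  (List.range' 1 (n - 2)).foldl (fun total j =>
    let left := ((List.range j).map (fun i =>
      if PySem.Int.mod (l.getD j 0) (l.getD i 0) = 0 then (1 : Int) else 0)).sum
    let right := ((List.range' (j + 1) (n - (j + 1))).map (fun k =>
      if PySem.Int.mod (l.getD k 0) (l.getD j 0) = 0 then (1 : Int) else 0)).sum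
    total + left * right) 0

-- ===== PRECONDITION & SPEC =====
-- Pre_ excludes exactly the inputs on which A raises ZeroDivisionError: len(l) ≥ 3 with a
-- zero among the first len(l)-1 elements (the last element is never used as a divisor).
-- B raises on exactly the same inputs.
def Pre_solution (l : List Int) : Prop := l.length < 3 ∨ ∀ x ∈ l.dropLast, x ≠ 0
instance (l : List Int) : Decidable (Pre_solution l) := by unfold Pre_solution; infer_instance
def pvWitness_solution : List Int := ([1, 2, 4, 8])
def Spec_solution (l : List Int) (out : Int) : Prop := out = solution_alt l
instance (l : List Int) (out : Int) : Decidable (Spec_solution l out) := by unfold Spec_solution; infer_instance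

-- ===== CLAIM (what is proved, stated in full; the proofs are below) =====
def Claim_equal_solution : Prop := ∀ (l : List Int), Dom_solution l → Pre_solution l → Spec_solution l (solution l)

-- ===== LEMMAS AND PROOFS =====

-- cnt l m b = number of indices j < b with l[m] % l[j] == 0 (as an Int)
def cnt (l : List Int) (m b : Nat) : Int :=
  ((List.range b).map (fun j => if PySem.Int.mod (l.getD m 0) (l.getD j 0) = 0 then (1 : Int) else 0)).sum

-- the fully-built doubles table after the first t positions 1..t have been filled
def tblD (l : List Int) (t : Nat) : List Int :=
  (List.range l.length).map (fun q => if 1 ≤ q ∧ q ≤ t then cnt l q q else 0)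

-- one summand of the triples total
def fterm (l : List Int) (k j : Nat) : Int :=
  if PySem.Int.mod (l.getD k 0) (l.getD j 0) = 0 then cnt l j j else 0

-- the common mathematical value of both programs, as A's double sum
def bigA (l : List Int) : Int :=
  ((List.range (l.length - 2)).map (fun i =>
    ((List.range (i + 1)).map (fun j => fterm l (i + 2) (j + 1))).sum)).sum

lemma set_map_range (n k : Nat) (f : Nat → Int) (v : Int) :
    ((List.range n).map f).set k v = (List.range n).map (fun q => if q = k then v else f q) := by
  apply List.ext_getElem
  · simp
  · intro i h1 h2
    simp only [List.getElem_set, List.getElem_map, List.getElem_range]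
    rcases eq_or_ne i k with h | h
    · simp [h]
    · simp [h, Ne.symm h]

lemma getD_set_self (xs : List Int) (k : Nat) (v : Int) (h : k < xs.length) :
    (xs.set k v).getD k 0 = v := by
  simp [List.getD_eq_getElem?_getD, h]

lemma getD_set_ne (xs : List Int) (k q : Nat) (v : Int) (hqk : q ≠ k) :
    (xs.set k v).getD q 0 = xs.getD q 0 := by
  simp [List.getD_eq_getElem?_getD, Ne.symm hqk]

lemma length_tblD (l : List Int) (t : Nat) : (tblD l t).length = l.length := by
  simp [tblD]

lemma getD_tblD (l : List Int) (t q : Nat) (hq : q < l.length) :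
    (tblD l t).getD q 0 = if 1 ≤ q ∧ q ≤ t then cnt l q q else 0 := by
  simpa [tblD] using PySem.List.getD_map_range _ _ _ _ hq

lemma cnt_succ (l : List Int) (m b : Nat) :
    cnt l m (b + 1) = cnt l m b + (if PySem.Int.mod (l.getD m 0) (l.getD b 0) = 0 then 1 else 0) := by
  simp [cnt, List.range_succ]

lemma tblD_zero (l : List Int) : tblD l 0 = List.replicate l.length 0 := by
  have : (tblD l 0) = (List.range l.length).map (fun _ => (0 : Int)) := by
    apply List.map_congr_left; intro q _
    have h1 : ¬ (1 ≤ q ∧ q ≤ 0) := by omega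
    rw [if_neg h1]
  simp [this, List.map_const']

lemma tblD_set (l : List Int) (t : Nat) (h : t + 1 < l.length) :
    (tblD l t).set (t + 1) (cnt l (t + 1) (t + 1)) = tblD l (t + 1) := by
  rw [tblD, set_map_range]
  apply List.map_congr_left
  intro q _
  rcases eq_or_ne q (t + 1) with h' | h'
  · simp [h']
  · have : ¬ (1 ≤ q ∧ q ≤ t + 1) ↔ ¬ (1 ≤ q ∧ q ≤ t) := by omega
    simp only [h']
    by_cases hq : 1 ≤ q ∧ q ≤ t
    · have : 1 ≤ q ∧ q ≤ t + 1 := by omega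
      simp [hq, this]
    · have : ¬ (1 ≤ q ∧ q ≤ t + 1) := by omega
      simp [hq, this]

lemma innerA (l : List Int) (i : Nat) (hi : i + 1 < l.length) :
    ∀ (m : Nat), m ≤ i + 1 → ∀ acc : Int,
    (List.range m).foldl (fun (st : List Int × Int) j =>
        let d := st.1.set (i + 1)
          (st.1.getD (i + 1) 0 + (if PySem.Int.mod (l.getD (i + 1) 0) (l.getD j 0) = 0 then 1 else 0))
        (d, st.2 + (if PySem.Int.mod (l.getD (i + 2) 0) (l.getD (j + 1) 0) = 0 then d.getD (j + 1) 0 else 0)))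
      (tblD l i, acc)
    = ((tblD l i).set (i + 1) (cnt l (i + 1) m),
       acc + ((List.range m).map (fun j => fterm l (i + 2) (j + 1))).sum) := by
  intro m
  induction m with
  | zero =>
    intro _ acc
    have h0 : (tblD l i).set (i + 1) (cnt l (i + 1) 0) = tblD l i := by
      rw [tblD, set_map_range]
      apply List.map_congr_left
      intro q _
      rcases eq_or_ne q (i + 1) with h' | h'
      · have : ¬ (1 ≤ q ∧ q ≤ i) := by omega
        simp [h', cnt]
      · simp [h']
    simp [h0]
  | succ m ih =>
    intro hm acc
    have hm' : m ≤ i + 1 := by omega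
    rw [List.range_succ, List.foldl_append, ih hm' acc]
    simp only [List.foldl_cons, List.foldl_nil]
    have hlen : i + 1 < ((tblD l i).set (i + 1) (cnt l (i + 1) m)).length := by
      simpa [length_tblD] using hi
    have hget : ((tblD l i).set (i + 1) (cnt l (i + 1) m)).getD (i + 1) 0 = cnt l (i + 1) m :=
      getD_set_self _ _ _ (by simpa [length_tblD] using hi)
    have hread : ((tblD l i).set (i + 1) (cnt l (i + 1) (m + 1))).getD (m + 1) 0
        = cnt l (m + 1) (m + 1) := by
      rcases eq_or_ne (m + 1) (i + 1) with h' | h'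
      · rw [h', getD_set_self _ _ _ (by simpa [length_tblD] using hi)]
      · rw [getD_set_ne _ _ _ _ h', getD_tblD l i (m + 1) (by omega)]
        have hc : 1 ≤ m + 1 ∧ m + 1 ≤ i := by omega
        rw [if_pos hc]
    simp only [hget, List.set_set, ← cnt_succ, hread]
    rw [List.map_append, List.sum_append, Prod.mk.injEq]
    refine ⟨rfl, ?_⟩
    simp only [List.map_cons, List.map_nil, List.sum_cons, List.sum_nil, fterm]
    ring

lemma outerA (l : List Int) :
    ∀ (t : Nat), t ≤ l.length - 2 →
    (List.range t).foldl (fun (st : List Int × Int) i =>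
      (List.range (i + 1)).foldl (fun (st : List Int × Int) j =>
        let d := st.1.set (i + 1)
          (st.1.getD (i + 1) 0 + (if PySem.Int.mod (l.getD (i + 1) 0) (l.getD j 0) = 0 then 1 else 0))
        (d, st.2 + (if PySem.Int.mod (l.getD (i + 2) 0) (l.getD (j + 1) 0) = 0 then d.getD (j + 1) 0 else 0)))
        st)
      (tblD l 0, 0)
    = (tblD l t,
       ((List.range t).map (fun i => ((List.range (i + 1)).map (fun j => fterm l (i + 2) (j + 1))).sum)).sum) := by
  intro t
  induction t with
  | zero => simp
  | succ t ih =>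
    intro ht
    have ht' : t ≤ l.length - 2 := by omega
    have hlt : t + 1 < l.length := by omega
    rw [List.range_succ, List.foldl_append, ih ht']
    simp only [List.foldl_cons, List.foldl_nil]
    rw [innerA l t hlt (t + 1) le_rfl, tblD_set l t hlt]
    rw [List.map_append, List.sum_append]
    simp

lemma solution_eq_bigA (l : List Int) : solution l = bigA l := by
  unfold solution bigA
  rw [← tblD_zero l, outerA l (l.length - 2) le_rfl]

-- ===== B side: middle-element product =====

-- right count: multiples of l[j] strictly after index j (up to n-1)
def rcnt (l : List Int) (j : Nat) : Int :=
  ((List.range' (j + 1) (l.length - (j + 1))).map (fun k =>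
    if PySem.Int.mod (l.getD k 0) (l.getD j 0) = 0 then (1 : Int) else 0)).sum

-- B's value as a sum over middle indices
def bigAlt (l : List Int) : Int :=
  ((List.range' 1 (l.length - 2)).map (fun j => cnt l j j * rcnt l j)).sum

lemma alt_eq_bigAlt (l : List Int) : solution_alt l = bigAlt l := by
  show (List.range' 1 (l.length - 2)).foldl
      (fun total j => total + cnt l j j * rcnt l j) 0 = bigAlt l
  rw [PySem.List.foldl_add (g := fun j => cnt l j j * rcnt l j)]
  simp [bigAlt]

-- a map-sum over range' a n as a Finset.Ico sum
lemma sum_range'_eq_Ico (a n : Nat) (f : Nat → Int) :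
    ((List.range' a n).map f).sum = ∑ x ∈ Finset.Ico a (a + n), f x := by
  induction n with
  | zero => simp
  | succ n ih =>
    have hc : List.range' a (n + 1) = List.range' a n ++ [a + 1 * n] := List.range'_concat
    rw [hc, List.map_append, List.sum_append,
        show a + (n + 1) = (a + n) + 1 by omega,
        Finset.sum_Ico_succ_top (by omega), ih]
    simp

lemma bigA_eq_bigAlt (l : List Int) (h3 : 3 ≤ l.length) : bigA l = bigAlt l := by
  set n := l.length with hn
  -- A's sum as ∑_{k ∈ Ico 2 n} ∑_{j ∈ Ico 1 k} fterm l k j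
  have hA : bigA l = ∑ k ∈ Finset.Ico 2 n, ∑ j ∈ Finset.Ico 1 k, fterm l k j := by
    unfold bigA
    rw [show ((List.range (n - 2)).map (fun i =>
          ((List.range (i + 1)).map (fun j => fterm l (i + 2) (j + 1))).sum)).sum
        = ((List.range' 0 (n - 2)).map (fun i =>
          ((List.range' 0 (i + 1)).map (fun j => fterm l (i + 2) (j + 1))).sum)).sum by
      simp [List.range'_eq_map_range]]
    rw [sum_range'_eq_Ico]
    rw [show (0 : Nat) + (n - 2) = n - 2 by omega]
    rw [show (∑ i ∈ Finset.Ico 0 (n - 2),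
          ((List.range' 0 (i + 1)).map (fun j => fterm l (i + 2) (j + 1))).sum)
        = ∑ i ∈ Finset.Ico 0 (n - 2), ∑ j ∈ Finset.Ico 0 (i + 1), fterm l (i + 2) (j + 1) by
      refine Finset.sum_congr rfl (fun i _ => ?_)
      simpa using sum_range'_eq_Ico 0 (i + 1) (fun j => fterm l (i + 2) (j + 1))]
    -- reindex k = i + 2, j' = j + 1
    rw [show (∑ i ∈ Finset.Ico 0 (n - 2), ∑ j ∈ Finset.Ico 0 (i + 1), fterm l (i + 2) (j + 1))
        = ∑ i ∈ Finset.Ico 0 (n - 2), ∑ j ∈ Finset.Ico 1 (i + 2), fterm l (i + 2) j by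
      refine Finset.sum_congr rfl (fun i _ => ?_)
      simpa using Finset.sum_Ico_add' (fun j => fterm l (i + 2) j) 0 (i + 1) 1]
    have h2 := Finset.sum_Ico_add' (fun k => ∑ j ∈ Finset.Ico 1 k, fterm l k j) 0 (n - 2) 2
    simpa [show (n - 2) + 2 = n by omega] using h2
  -- B's sum as ∑_{j ∈ Ico 1 (n-1)} ∑_{k ∈ Ico (j+1) n} fterm l k j
  have hB : bigAlt l = ∑ j ∈ Finset.Ico 1 (n - 1), ∑ k ∈ Finset.Ico (j + 1) n, fterm l k j := by
    unfold bigAlt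
    rw [sum_range'_eq_Ico 1 (n - 2), show (1 : Nat) + (n - 2) = n - 1 by omega]
    refine Finset.sum_congr rfl (fun j hj => ?_)
    have hj' := Finset.mem_Ico.mp hj
    rw [rcnt, sum_range'_eq_Ico (j + 1) (n - (j + 1)),
        show (j + 1) + (n - (j + 1)) = n by omega]
    rw [Finset.mul_sum]
    refine Finset.sum_congr rfl (fun k _ => ?_)
    unfold fterm
    split_ifs <;> simp
  rw [hA, hB]
  -- extend both to Ico 1 n and swap with sum_Ico_Ico_comm'
  have hswap := Finset.sum_Ico_Ico_comm' 1 n (fun j k => fterm l k j)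
  -- RHS of hswap: ∑ k ∈ Ico 1 n, ∑ j ∈ Ico 1 k  (since Ico 1 k with lower bound 1)
  have hL : (∑ j ∈ Finset.Ico 1 n, ∑ k ∈ Finset.Ico (j + 1) n, fterm l k j)
      = ∑ j ∈ Finset.Ico 1 (n - 1), ∑ k ∈ Finset.Ico (j + 1) n, fterm l k j := by
    rw [show n = (n - 1) + 1 by omega, Finset.sum_Ico_succ_top (by omega)]
    simp
  have hR : (∑ k ∈ Finset.Ico 1 n, ∑ j ∈ Finset.Ico 1 k, fterm l k j)
      = ∑ k ∈ Finset.Ico 2 n, ∑ j ∈ Finset.Ico 1 k, fterm l k j := by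
    rw [Finset.sum_eq_sum_Ico_succ_bot (by omega)]
    simp
  rw [← hR, ← hL, ← hswap]

-- ===== VERDICT (by name: the statement is the Claim_ definition above) =====
theorem solution_spec : Claim_equal_solution := by
  intro l _ _
  unfold Spec_solution
  by_cases h3 : l.length < 3
  · have hz : l.length - 2 = 0 := by omega
    simp [solution, solution_alt, hz]
  · rw [solution_eq_bigA, alt_eq_bigAlt, ← bigA_eq_bigAlt l (by omega)]
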